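-- pv_equiv track=rewrite | github.com/wilmurillo-ai/Design-Assistant | .skills/openclaw-skills/skills/ludiansheng/travelogue-weaver/scripts/export_generator.py | group_moments_by_date
-- ===== SOURCE A (Python) =====
-- from typing import Dict, List, Optional
--
-- def format_date_only(iso_date: str) -> str:
--     """只提取日期部分"""
--     try:
--         if 'T' in iso_date:
--             return iso_date.split('T')[0]
--         return iso_date.split(' ')[0] if ' ' in iso_date else iso_date
--     except:
--         return iso_date
--
-- def group_moments_by_date(moments: List[Dict]) -> Dict[str, List[Dict]]:
--     """按日期分组素材"""
--     groups = {}
--     for m in moments: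
--         date_str = format_date_only(m['timestamp'])
--         if date_str not in groups:
--             groups[date_str] = []
--         groups[date_str].append(m)
--     return groups
-- ===== SOURCE B (Python) =====
-- from typing import Dict, List, Optional
--
-- def format_date_only(iso_date: str) -> str:
--     """只提取日期部分"""
--     try:
--         if 'T' in iso_date:
--             return iso_date.split('T')[0]
--         return iso_date.split(' ')[0] if ' ' in iso_date else iso_date
--     except:
--         return iso_date
--
-- def group_moments_by_date(moments: List[Dict]) -> Dict[str, List[Dict]]:
--     """按日期分组素材: first-appearance-ordered distinct dates, then one filter pass per date."""
--     dates = list(dict.fromkeys(format_date_only(m['timestamp']) for m in moments))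
--     return {d: [m for m in moments if format_date_only(m['timestamp']) == d] for d in dates}
-- ===== Notes on version B (the rewrite author's own statement) =====
-- stated objective: alternative
-- what changed: B replaces A's incremental dict-of-lists accumulation with a dedup of the mapped dates (first-appearance order) followed by a dict comprehension that filters the moments once per distinct date.
import Mathlib
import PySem

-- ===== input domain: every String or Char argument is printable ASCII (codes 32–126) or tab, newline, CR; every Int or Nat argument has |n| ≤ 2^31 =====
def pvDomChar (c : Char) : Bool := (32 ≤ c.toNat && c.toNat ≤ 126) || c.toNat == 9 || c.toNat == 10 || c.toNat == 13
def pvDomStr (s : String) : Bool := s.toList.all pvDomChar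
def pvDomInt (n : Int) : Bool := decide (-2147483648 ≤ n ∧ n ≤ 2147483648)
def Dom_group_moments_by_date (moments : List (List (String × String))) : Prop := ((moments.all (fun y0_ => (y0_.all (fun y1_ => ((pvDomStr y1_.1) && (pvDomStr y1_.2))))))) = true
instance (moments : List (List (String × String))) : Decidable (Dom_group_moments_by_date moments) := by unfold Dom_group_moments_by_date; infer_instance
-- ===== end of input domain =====

-- B groups by building the first-appearance-ordered list of distinct dates and filtering the
-- moments once per date, instead of A's incremental dict-of-lists accumulation (alternative, not faster).

-- ===== PORT A =====
-- format_date_only: the try/except can never fire (str.split raises only on empty sep).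
-- s.split(sep)[0]: split with a nonempty sep is always nonempty, so headD "" is exact.
def format_date_only (iso_date : String) : String :=
  if PySem.Str.isIn "T" iso_date then ((PySem.Str.split? iso_date "T").getD []).headD ""
  else if PySem.Str.isIn " " iso_date then ((PySem.Str.split? iso_date " ").getD []).headD ""
  else iso_date

-- m['timestamp'] on the association-list moment (first match, per the type convention);
-- getD "" is only reached outside Pre_, where Python raises KeyError.
def tsOf (m : List (String × String)) : String :=
  ((m.find? (fun p => p.1 == "timestamp")).map Prod.snd).getD ""

def group_moments_by_date (moments : List (List (String × String))) : List (String × List (List (String × String))) :=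
  (moments.foldl (fun groups m =>
      let date_str := format_date_only (tsOf m)
      let groups := if groups.contains date_str then groups else groups.insert date_str []
      groups.modify date_str [] (fun l => l ++ [m]))
    PySem.Dict.empty).items

-- ===== PORT B =====
def group_moments_by_date_alt (moments : List (List (String × String))) : List (String × List (List (String × String))) :=
  let dates := PySem.List.dedup (moments.map (fun m => format_date_only (tsOf m)))
  dates.map (fun d => (d, moments.filter (fun m => format_date_only (tsOf m) == d)))

-- ===== PRECONDITION & SPEC =====
-- Pre_ excludes exactly the inputs where some moment lacks a 'timestamp' key: there Python A
-- (and Python B alike) raises KeyError.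
def Pre_group_moments_by_date (moments : List (List (String × String))) : Prop :=
  (moments.all (fun m => (m.find? (fun p => p.1 == "timestamp")).isSome)) = true
instance (moments : List (List (String × String))) : Decidable (Pre_group_moments_by_date moments) := by unfold Pre_group_moments_by_date; infer_instance

def pvWitness_group_moments_by_date : (List (List (String × String))) :=
  [[("timestamp", "2024-01-01T10:00"), ("text", "a")],
   [("timestamp", "2024-01-01 09:00")],
   [("timestamp", "2024-01-02")]]

def Spec_group_moments_by_date (moments : List (List (String × String))) (out : List (String × List (List (String × String)))) : Prop := out = group_moments_by_date_alt moments
instance (moments : List (List (String × String))) (out : List (String × List (List (String × String)))) : Decidable (Spec_group_moments_by_date moments out) := by unfold Spec_group_moments_by_date; infer_instance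

-- ===== CLAIM (what is proved, stated in full; the proofs are below) =====
def Claim_equal_group_moments_by_date : Prop := ∀ (moments : List (List (String × String))), Dom_group_moments_by_date moments → Pre_group_moments_by_date moments → Spec_group_moments_by_date moments (group_moments_by_date moments)

-- ===== LEMMAS AND PROOFS =====

-- A's per-moment step is exactly a single modify: inserting [] first and then appending via
-- modify equals modify with default [] (modify itself appends the fresh key when absent).
theorem pv_step_eq (g : PySem.Dict String (List (List (String × String)))) (d : String)
    (f : List (List (String × String)) → List (List (String × String))) :
    (if g.contains d then g else g.insert d []).modify d [] f = g.modify d [] f := by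
  by_cases h : g.contains d = true
  · simp [h]
  · simp only [h, Bool.false_eq_true, if_false]
    rw [PySem.Dict.modify, PySem.Dict.modify, PySem.Dict.getD_insert_self,
        PySem.Dict.insert_insert_self,
        PySem.Dict.getD_of_not_contains _ _ (by simpa using h)]

-- A's whole loop is the canonical key/value modify-append fold over (key m, m) pairs
theorem pv_fold_eq (moments : List (List (String × String))) :
    (moments.foldl (fun groups m =>
        let date_str := format_date_only (tsOf m)
        let groups := if groups.contains date_str then groups else groups.insert date_str []
        groups.modify date_str [] (fun l => l ++ [m])) PySem.Dict.empty)
      = (moments.map (fun m => (format_date_only (tsOf m), m))).foldl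
          (fun d p => d.modify p.1 [] (fun l => l ++ [p.2])) PySem.Dict.empty := by
  rw [List.foldl_map]
  exact PySem.List.foldl_congr_mem _ _ _ _
    (fun acc m _ => pv_step_eq acc (format_date_only (tsOf m)) (fun l => l ++ [m]))

-- ===== VERDICT (by name: the statement is the Claim_ definition above) =====
theorem group_moments_by_date_spec : Claim_equal_group_moments_by_date := by
  intro moments _ _
  unfold Spec_group_moments_by_date group_moments_by_date group_moments_by_date_alt
  rw [pv_fold_eq]
  set prs := moments.map (fun m => (format_date_only (tsOf m), m)) with hprs
  set D := prs.foldl (fun d p => d.modify p.1 [] (fun l => l ++ [p.2])) PySem.Dict.empty with hD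
  have hnd : D.keys.Nodup := by
    rw [hD, hprs, List.foldl_map]
    exact PySem.Dict.nodup_keys_foldl_modify_key _ _ _ _ _
      (by simp [PySem.Dict.keys_empty])
  have hkeys : D.keys = PySem.Set.ofList (moments.map (fun m => format_date_only (tsOf m))) := by
    rw [hD, hprs, List.foldl_map]
    rw [PySem.Dict.keys_foldl_modify_key]
    simp [PySem.Dict.keys_empty, PySem.Set.update, PySem.Set.ofList, PySem.Set.empty]
  have hget : ∀ k, D.getD k [] = moments.filter (fun m => format_date_only (tsOf m) == k) := by
    intro k
    rw [hD, PySem.Dict.getD_foldl_modify_append, hprs]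
    simp [List.filter_map, Function.comp_def]
  rw [PySem.Dict.items_eq_map_keys D hnd [], hkeys]
  simp only [hget, PySem.List.dedup_eq_ofList]
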